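-- pv_equiv track=rewrite | github.com/bharath21/AlgoDsPractice | Auquan/test.py | get_masked_string
-- ===== SOURCE A (Python) =====
-- def get_masked_string(string, substrings):
--     masked_string = [False] * len(string)
--     end = 0
--     for i in range(len(string)):
--         for sub_string in substrings:
--             if(i+len(sub_string) <= len(string) and string[i:i+len(sub_string)] == sub_string):
--                 end = max(end, i+len(sub_string))
--         masked_string[i] = end > i
--     return masked_string
-- ===== SOURCE B (Python) =====
-- def get_masked_string(string, substrings):
--     n = len(string)
--     intervals = []
--     for sub in substrings:
--         L = len(sub)
--         for i in range(n - L + 1):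
--             if L and string[i:i+L] == sub:
--                 intervals.append((i, i + L))
--     return [any(a <= k < b for (a, b) in intervals) for k in range(n)]
-- ===== Notes on version B (the rewrite author's own statement) =====
-- stated objective: alternative
-- what changed: Replaced A's single left-to-right sweep that maintains a running maximum end pointer (masked[i] = end > i) by a two-stage decomposition: first collect the list of all occurrence intervals (start, end) per substring, then build the output by testing each position for membership in any interval.
import Mathlib
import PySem

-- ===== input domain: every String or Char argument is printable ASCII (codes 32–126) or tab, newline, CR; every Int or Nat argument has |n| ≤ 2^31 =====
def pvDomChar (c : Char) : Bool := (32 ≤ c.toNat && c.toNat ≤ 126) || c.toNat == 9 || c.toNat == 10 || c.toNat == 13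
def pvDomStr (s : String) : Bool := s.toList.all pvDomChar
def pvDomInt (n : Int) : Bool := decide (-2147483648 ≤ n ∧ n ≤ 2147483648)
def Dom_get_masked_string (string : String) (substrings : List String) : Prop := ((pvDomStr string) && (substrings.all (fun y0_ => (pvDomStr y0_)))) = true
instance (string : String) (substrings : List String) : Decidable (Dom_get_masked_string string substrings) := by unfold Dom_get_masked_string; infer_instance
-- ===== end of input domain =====

-- B replaces A's running max-end sweep (masked[i] = end > i) by a two-stage algorithm:
-- collect every occurrence interval (start, end), then test each position for membership
-- in any interval (objective: alternative decomposition).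

-- ===== PORT A =====
def get_masked_string (string : String) (substrings : List String) : List Bool :=
  let s := string.toList
  let n : Int := PySem.List.len s
  ((PySem.List.pyRange 0 n 1).foldl
    (fun (st : List Bool × Int) (i : Int) =>
      let e := substrings.foldl
        (fun (e : Int) (sub : String) =>
          if i + PySem.Str.len sub ≤ n ∧
             PySem.List.slice s (some i) (some (i + PySem.Str.len sub)) = sub.toList
          then max e (i + PySem.Str.len sub) else e) st.2
      (PySem.List.pySetD st.1 i (decide (e > i)), e))
    (List.replicate s.length false, 0)).1

-- ===== PORT B =====
def get_masked_string_alt (string : String) (substrings : List String) : List Bool :=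
  let s := string.toList
  let n : Int := PySem.List.len s
  let intervals : List (Int × Int) := substrings.foldl
    (fun (acc : List (Int × Int)) (sub : String) =>
      let L := PySem.Str.len sub
      (PySem.List.pyRange 0 (n - L + 1) 1).foldl
        (fun (acc : List (Int × Int)) (i : Int) =>
          if L ≠ 0 ∧ PySem.List.slice s (some i) (some (i + L)) = sub.toList
          then acc ++ [(i, i + L)] else acc) acc) []
  (PySem.List.pyRange 0 n 1).map
    (fun k => intervals.any (fun ab => decide (ab.1 ≤ k ∧ k < ab.2)))

-- ===== PRECONDITION & SPEC =====
def Spec_get_masked_string (string : String) (substrings : List String) (out : List Bool) : Prop := out = get_masked_string_alt string substrings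
instance (string : String) (substrings : List String) (out : List Bool) : Decidable (Spec_get_masked_string string substrings out) := by unfold Spec_get_masked_string; infer_instance

-- ===== CLAIM (what is proved, stated in full; the proofs are below) =====
def Claim_equal_get_masked_string : Prop := ∀ (string : String) (substrings : List String), Dom_get_masked_string string substrings → Spec_get_masked_string string substrings (get_masked_string string substrings)

-- ===== LEMMAS AND PROOFS =====

-- "substring sub occurs at position j of s"
abbrev pvMatchP (s : List Char) (j : Nat) (sub : String) : Prop :=
  List.take sub.toList.length (List.drop j s) = sub.toList

-- "position k is covered by some occurrence of some substring"
abbrev pvCoverP (s : List Char) (subs : List String) (k : Nat) : Prop :=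
  ∃ j, j ≤ k ∧ ∃ sub ∈ subs, k < j + sub.toList.length ∧ pvMatchP s j sub

-- A's test at position j (fit plus slice equality)
abbrev pvCondA (s : List Char) (j : Nat) (sub : String) : Prop :=
  (j : Int) + PySem.Str.len sub ≤ PySem.List.len s ∧
  PySem.List.slice s (some (j : Int)) (some ((j : Int) + PySem.Str.len sub)) = sub.toList

lemma pv_fit_of_match {s : List Char} {j : Nat} {sub : String}
    (hj : j ≤ s.length) (h : pvMatchP s j sub) : j + sub.toList.length ≤ s.length := by
  have := congrArg List.length h
  simp only [List.length_take, List.length_drop] at this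
  omega

lemma pv_condA_iff (s : List Char) {j : Nat} (hj : j < s.length) (sub : String) :
    pvCondA s j sub ↔ pvMatchP s j sub := by
  unfold pvCondA pvMatchP
  rw [PySem.List.len_eq, PySem.Str.len_eq, PySem.List.slice_natCast_add]
  constructor
  · exact And.right
  · intro h
    refine ⟨?_, h⟩
    have := pv_fit_of_match (Nat.le_of_lt hj) h
    omega

-- A's step function on Nat indices (what A's outer loop does after range normalisation)
def pvStepA (s : List Char) (substrings : List String) (st : List Bool × Int) (j : Nat) :
    List Bool × Int :=
  let e := substrings.foldl
    (fun (e : Int) (sub : String) =>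
      if (j : Int) + PySem.Str.len sub ≤ PySem.List.len s ∧
         PySem.List.slice s (some (j : Int)) (some ((j : Int) + PySem.Str.len sub)) = sub.toList
      then max e ((j : Int) + PySem.Str.len sub) else e) st.2
  (PySem.List.pySetD st.1 (j : Int) (decide (e > (j : Int))), e)

lemma pv_A_eq_fold (string : String) (substrings : List String) :
    get_masked_string string substrings =
      ((List.range string.toList.length).foldl (pvStepA string.toList substrings)
        (List.replicate string.toList.length false, 0)).1 := by
  unfold get_masked_string pvStepA
  simp only [PySem.List.len_eq, PySem.List.pyRange_zero_nat, List.foldl_map]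

-- A's inner fold (the running maximum over the substrings) exceeds c iff the old value
-- does or some accepted substring end does
lemma pv_innerA_gt (s : List Char) (i c : Int) :
    ∀ (l : List String) (e : Int),
      (l.foldl (fun (e : Int) (sub : String) =>
        if i + PySem.Str.len sub ≤ PySem.List.len s ∧
           PySem.List.slice s (some i) (some (i + PySem.Str.len sub)) = sub.toList
        then max e (i + PySem.Str.len sub) else e) e) > c ↔
      e > c ∨ ∃ sub ∈ l,
        (i + PySem.Str.len sub ≤ PySem.List.len s ∧
         PySem.List.slice s (some i) (some (i + PySem.Str.len sub)) = sub.toList) ∧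
        i + PySem.Str.len sub > c := by
  intro l
  induction l with
  | nil => simp
  | cons a t ih =>
    intro e
    simp only [List.foldl_cons]
    split_ifs with h
    · rw [ih]
      have hmax : max e (i + PySem.Str.len a) > c ↔ e > c ∨ i + PySem.Str.len a > c := by omega
      rw [hmax]
      simp only [List.mem_cons]
      constructor
      · rintro ((he | ha) | ⟨sub, hs, hc, hgt⟩)
        · exact Or.inl he
        · exact Or.inr ⟨a, Or.inl rfl, h, ha⟩
        · exact Or.inr ⟨sub, Or.inr hs, hc, hgt⟩
      · rintro (he | ⟨sub, (rfl | hs), hc, hgt⟩)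
        · exact Or.inl (Or.inl he)
        · exact Or.inl (Or.inr hgt)
        · exact Or.inr ⟨sub, hs, hc, hgt⟩
    · rw [ih]
      simp only [List.mem_cons]
      constructor
      · rintro (he | ⟨sub, hs, hc, hgt⟩)
        · exact Or.inl he
        · exact Or.inr ⟨sub, Or.inr hs, hc, hgt⟩
      · rintro (he | ⟨sub, (rfl | hs), hc, hgt⟩)
        · exact Or.inl he
        · exact absurd hc h
        · exact Or.inr ⟨sub, hs, hc, hgt⟩

-- loop invariant for A's outer sweep
lemma pv_A_loop (s : List Char) (subs : List String) :
    ∀ (t : Nat), t ≤ s.length →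
      (((List.range t).foldl (pvStepA s subs) (List.replicate s.length false, 0)).1.length
          = s.length) ∧
      (∀ c : Int,
        ((List.range t).foldl (pvStepA s subs) (List.replicate s.length false, 0)).2 > c ↔
          0 > c ∨ ∃ j < t, ∃ sub ∈ subs, pvCondA s j sub ∧ (j : Int) + PySem.Str.len sub > c) ∧
      (∀ k : Nat,
        ((List.range t).foldl (pvStepA s subs) (List.replicate s.length false, 0)).1[k]? =
          if k < s.length then some (decide (k < t ∧ pvCoverP s subs k)) else none) := by
  intro t
  induction t with
  | zero =>
    intro _
    refine ⟨by simp, by simp, ?_⟩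
    intro k
    simp [List.getElem?_replicate]
  | succ t ih =>
    intro ht
    obtain ⟨hlen, hE, hget⟩ := ih (Nat.le_of_succ_le ht)
    rw [List.range_succ, List.foldl_append, List.foldl_cons, List.foldl_nil]
    set st := (List.range t).foldl (pvStepA s subs) (List.replicate s.length false, 0) with hst
    simp only [pvStepA]
    have hE' : ∀ c : Int,
        (subs.foldl (fun (e : Int) (sub : String) =>
          if (t : Int) + PySem.Str.len sub ≤ PySem.List.len s ∧
             PySem.List.slice s (some (t : Int)) (some ((t : Int) + PySem.Str.len sub))
               = sub.toList
          then max e ((t : Int) + PySem.Str.len sub) else e) st.2) > c ↔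
        0 > c ∨ ∃ j < t + 1, ∃ sub ∈ subs, pvCondA s j sub ∧ (j : Int) + PySem.Str.len sub > c := by
      intro c
      rw [pv_innerA_gt s (t : Int) c subs st.2, hE c]
      constructor
      · rintro ((h0 | ⟨j, hj, sub, hs, hcond, hgt⟩) | ⟨sub, hs, hcond, hgt⟩)
        · exact Or.inl h0
        · exact Or.inr ⟨j, Nat.lt_succ_of_lt hj, sub, hs, hcond, hgt⟩
        · exact Or.inr ⟨t, Nat.lt_succ_self t, sub, hs, hcond, hgt⟩
      · rintro (h0 | ⟨j, hj, sub, hs, hcond, hgt⟩)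
        · exact Or.inl (Or.inl h0)
        · rcases Nat.lt_succ_iff_lt_or_eq.mp hj with hj' | rfl
          · exact Or.inl (Or.inr ⟨j, hj', sub, hs, hcond, hgt⟩)
          · exact Or.inr ⟨sub, hs, hcond, hgt⟩
    refine ⟨?_, hE', ?_⟩
    · simpa using hlen
    · intro k
      have hcov : ((subs.foldl (fun (e : Int) (sub : String) =>
          if (t : Int) + PySem.Str.len sub ≤ PySem.List.len s ∧
             PySem.List.slice s (some (t : Int)) (some ((t : Int) + PySem.Str.len sub))
               = sub.toList
          then max e ((t : Int) + PySem.Str.len sub) else e) st.2) > (t : Int)) ↔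
          pvCoverP s subs t := by
        rw [hE' (t : Int)]
        constructor
        · rintro (h0 | ⟨j, hj, sub, hs, hcond, hgt⟩)
          · exact absurd h0 (by omega)
          · have hm := (pv_condA_iff s (by omega) sub).mp hcond
            rw [PySem.Str.len_eq] at hgt
            exact ⟨j, by omega, sub, hs, by omega, hm⟩
        · rintro ⟨j, hj, sub, hs, hc, hm⟩
          refine Or.inr ⟨j, by omega, sub, hs, (pv_condA_iff s (by omega) sub).mpr hm, ?_⟩
          rw [PySem.Str.len_eq]
          omega
      rw [PySem.List.pySetD_natCast, List.getElem?_set, hlen, hget k]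
      by_cases hkt : t = k
      · subst hkt
        have hklen : t < s.length := by omega
        rw [if_pos rfl, if_pos hklen]
        rw [if_pos hklen]
        congr 1
        rw [decide_eq_decide, hcov]
        exact ⟨fun h => ⟨Nat.lt_succ_self t, h⟩, And.right⟩
      · rw [if_neg hkt]
        split_ifs with hk
        · congr 1
          rw [decide_eq_decide]
          constructor
          · rintro ⟨h1, h2⟩; exact ⟨by omega, h2⟩
          · rintro ⟨h1, h2⟩; exact ⟨by omega, h2⟩
        · rfl

-- membership in a filtered-append fold (shape of B's interval collection)
lemma pv_foldl_if_mem {α : Type} {β : Type} [DecidableEq β]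
    (p : α → Prop) [DecidablePred p] (f : α → β) :
    ∀ (l : List α) (acc : List β) (x : β),
      (x ∈ l.foldl (fun acc i => if p i then acc ++ [f i] else acc) acc) ↔
        x ∈ acc ∨ ∃ i ∈ l, p i ∧ x = f i := by
  intro l
  induction l with
  | nil => simp
  | cons a t ih =>
    intro acc x
    simp only [List.foldl_cons]
    split_ifs with h
    · rw [ih]
      simp only [List.mem_append, List.mem_cons, List.not_mem_nil, or_false]
      constructor
      · rintro ((hx | rfl) | ⟨i, hi, hp, rfl⟩)
        · exact Or.inl hx
        · exact Or.inr ⟨a, Or.inl rfl, h, rfl⟩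
        · exact Or.inr ⟨i, Or.inr hi, hp, rfl⟩
      · rintro (hx | ⟨i, (rfl | hi), hp, rfl⟩)
        · exact Or.inl (Or.inl hx)
        · exact Or.inl (Or.inr rfl)
        · exact Or.inr ⟨i, hi, hp, rfl⟩
    · rw [ih]
      simp only [List.mem_cons]
      constructor
      · rintro (hx | ⟨i, hi, hp, rfl⟩)
        · exact Or.inl hx
        · exact Or.inr ⟨i, Or.inr hi, hp, rfl⟩
      · rintro (hx | ⟨i, (rfl | hi), hp, rfl⟩)
        · exact Or.inl hx
        · exact absurd hp h
        · exact Or.inr ⟨i, hi, hp, rfl⟩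

-- membership in B's full interval list
lemma pv_intervals_mem (s : List Char) :
    ∀ (subs : List String) (acc : List (Int × Int)) (ab : Int × Int),
      (ab ∈ subs.foldl
        (fun (acc : List (Int × Int)) (sub : String) =>
          let L := PySem.Str.len sub
          (PySem.List.pyRange 0 (((s.length : Int)) - L + 1) 1).foldl
            (fun (acc : List (Int × Int)) (i : Int) =>
              if L ≠ 0 ∧ PySem.List.slice s (some i) (some (i + L)) = sub.toList
              then acc ++ [(i, i + L)] else acc) acc) acc) ↔
      ab ∈ acc ∨ ∃ sub ∈ subs, ∃ i : Int,
        (0 ≤ i ∧ i < ((s.length : Int)) - PySem.Str.len sub + 1) ∧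
        (PySem.Str.len sub ≠ 0 ∧
          PySem.List.slice s (some i) (some (i + PySem.Str.len sub)) = sub.toList) ∧
        ab = (i, i + PySem.Str.len sub) := by
  intro subs
  induction subs with
  | nil => simp
  | cons a t ih =>
    intro acc ab
    simp only [List.foldl_cons]
    rw [ih]
    rw [pv_foldl_if_mem (fun i => PySem.Str.len a ≠ 0 ∧
          PySem.List.slice s (some i) (some (i + PySem.Str.len a)) = a.toList)
        (fun i => (i, i + PySem.Str.len a))]
    simp only [PySem.List.mem_pyRange_one, List.mem_cons]
    constructor
    · rintro ((hx | ⟨i, hi, hp, rfl⟩) | ⟨sub, hs, i, hi, hp, rfl⟩)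
      · exact Or.inl hx
      · exact Or.inr ⟨a, Or.inl rfl, i, hi, hp, rfl⟩
      · exact Or.inr ⟨sub, Or.inr hs, i, hi, hp, rfl⟩
    · rintro (hx | ⟨sub, (rfl | hs), i, hi, hp, rfl⟩)
      · exact Or.inl (Or.inl hx)
      · exact Or.inl (Or.inr ⟨i, hi, hp, rfl⟩)
      · exact Or.inr ⟨sub, hs, i, hi, hp, rfl⟩

-- B's output cell at a valid position records coverage
lemma pv_B_get (string : String) (substrings : List String) (k : Nat)
    (hk : k < string.toList.length) :
    (get_masked_string_alt string substrings)[k]? =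
      some (decide (pvCoverP string.toList substrings k)) := by
  unfold get_masked_string_alt
  set s := string.toList with hs
  simp only [PySem.List.len_eq, PySem.List.pyRange_zero_nat, List.map_map]
  rw [List.getElem?_map, List.getElem?_range hk]
  simp only [Option.map_some, Function.comp_apply, Option.some.injEq]
  rw [Bool.eq_iff_iff, List.any_eq_true, decide_eq_true_iff]
  constructor
  · rintro ⟨ab, hmem, hab⟩
    rw [pv_intervals_mem s substrings [] ab] at hmem
    rcases hmem with h0 | ⟨sub, hsub, i, ⟨hi0, hin⟩, ⟨hL, hsl⟩, rfl⟩
    · simp at h0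
    · rw [decide_eq_true_iff] at hab
      obtain ⟨h1, h2⟩ := hab
      have hiN : i = ((i.toNat : Nat) : Int) := by omega
      rw [PySem.Str.len_eq] at hL hin h2
      have hm : pvMatchP s i.toNat sub := by
        unfold pvMatchP
        rw [← PySem.List.slice_natCast_add, ← hiN, ← PySem.Str.len_eq]
        exact hsl
      exact ⟨i.toNat, by omega, sub, hsub, by omega, hm⟩
  · rintro ⟨j, hjk, sub, hsub, hjl, hm⟩
    have hfit : j + sub.toList.length ≤ s.length := pv_fit_of_match (by omega) hm
    refine ⟨((j : Int), (j : Int) + PySem.Str.len sub), ?_, ?_⟩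
    · rw [pv_intervals_mem s substrings []]
      refine Or.inr ⟨sub, hsub, (j : Int), ?_, ?_, rfl⟩
      · rw [PySem.Str.len_eq]; omega
      · refine ⟨?_, ?_⟩
        · rw [PySem.Str.len_eq]
          intro h
          have : sub.toList.length = 0 := by omega
          omega
        · rw [PySem.Str.len_eq, PySem.List.slice_natCast_add]
          exact hm
    · rw [decide_eq_true_iff, PySem.Str.len_eq]
      constructor <;> omega

lemma pv_B_len (string : String) (substrings : List String) :
    (get_masked_string_alt string substrings).length = string.toList.length := by
  unfold get_masked_string_alt
  simp [PySem.List.len_eq, PySem.List.pyRange_zero_nat]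

-- ===== VERDICT (by name: the statement is the Claim_ definition above) =====
theorem get_masked_string_spec : Claim_equal_get_masked_string := by
  intro string substrings _
  unfold Spec_get_masked_string
  rw [pv_A_eq_fold]
  set s := string.toList with hs
  obtain ⟨hAl, -, hAg⟩ := pv_A_loop s substrings s.length le_rfl
  apply List.ext_getElem?
  intro k
  rw [hAg k]
  by_cases hk : k < s.length
  · rw [if_pos hk, pv_B_get string substrings k hk]
    congr 1
    rw [decide_eq_decide]
    exact ⟨And.right, fun h => ⟨hk, h⟩⟩
  · rw [if_neg hk]
    exact (List.getElem?_eq_none (by rw [pv_B_len, ← hs]; omega)).symm
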